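-- pv_equiv track=rewrite | github.com/devwon/study | algorithm/imp_1.py | is_contain_sth
-- ===== SOURCE A (Python) =====
-- def is_contain_sth(h: int) -> int:
--     count = 0
--     for i in range(h + 1):
--         for j in range(60):
--             for k in range(60):
--                 # 매 시각 안에 '3'이 포함되어 있다면 카운트 증가
--                 if '3' in str(i) + str(j) + str(k):
--                     count += 1
--     return count
-- ===== SOURCE B (Python) =====
-- def is_contain_sth(h: int) -> int:
--     # Per hour: all 3600 minute:second pairs count if the hour shows a '3';
--     # otherwise exactly 1575 = 3600 - 45*45 pairs contain a '3' (45 of 0..59 lack a '3').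
--     count = 0
--     for i in range(h + 1):
--         count += 3600 if '3' in str(i) else 1575
--     return count
-- ===== Notes on version B (the rewrite author's own statement) =====
-- stated objective: faster
-- what changed: B drops the inner minute/second loops entirely: per hour it adds one of two precomputed constants depending only on whether the hour's decimal digits contain the digit three, making the run linear in the hour bound instead of scanning every second.
import Mathlib
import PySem

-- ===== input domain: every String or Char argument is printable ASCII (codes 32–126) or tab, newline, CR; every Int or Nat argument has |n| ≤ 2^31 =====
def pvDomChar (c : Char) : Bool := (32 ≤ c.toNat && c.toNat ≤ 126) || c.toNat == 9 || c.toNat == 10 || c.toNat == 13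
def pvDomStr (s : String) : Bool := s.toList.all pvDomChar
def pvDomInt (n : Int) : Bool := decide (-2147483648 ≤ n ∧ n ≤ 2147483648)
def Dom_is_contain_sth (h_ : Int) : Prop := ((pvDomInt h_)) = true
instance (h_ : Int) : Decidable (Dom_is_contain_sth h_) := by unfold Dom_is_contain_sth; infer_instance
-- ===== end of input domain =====

-- ===== PORT A =====
-- A: triple nested loop over hours 0..h_ and minutes/seconds 0..59, counting times whose digits contain '3'.
def is_contain_sth (h_ : Int) : Int :=
  (PySem.List.pyRange 0 (h_ + 1) 1).foldl (fun count i =>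
    (PySem.List.pyRange 0 60 1).foldl (fun count j =>
      (PySem.List.pyRange 0 60 1).foldl (fun count k =>
        if PySem.Str.isIn "3" (PySem.Int.toStr i ++ PySem.Int.toStr j ++ PySem.Int.toStr k)
        then count + 1 else count) count) count) 0

-- ===== PORT B =====
-- B: one pass over the hours; per hour add 3600 if the hour contains '3', else the constant 1575.
def is_contain_sth_alt (h_ : Int) : Int :=
  (PySem.List.pyRange 0 (h_ + 1) 1).foldl (fun count i =>
    count + (if PySem.Str.isIn "3" (PySem.Int.toStr i) then 3600 else 1575)) 0

-- ===== PRECONDITION & SPEC =====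
def Spec_is_contain_sth (h_ : Int) (out : Int) : Prop := out = is_contain_sth_alt h_
instance (h_ : Int) (out : Int) : Decidable (Spec_is_contain_sth h_ out) := by unfold Spec_is_contain_sth; infer_instance

-- ===== CLAIM (what is proved, stated in full; the proofs are below) =====
def Claim_equal_is_contain_sth : Prop := ∀ (h_ : Int), Dom_is_contain_sth h_ → Spec_is_contain_sth h_ (is_contain_sth h_)

-- ===== LEMMAS AND PROOFS =====

-- '3' is in a string iff the char '3' is among its characters
theorem isIn3_eq_contains (s : String) :
    PySem.Str.isIn "3" s = s.toList.contains '3' := by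
  have h3 : ("3" : String).toList = ['3'] := rfl
  rw [Bool.eq_iff_iff, PySem.Str.isIn_eq, PySem.Chars.isIn_iff_infix, h3,
    List.singleton_infix_iff, List.contains_iff_mem]

-- membership of '3' distributes over string append
theorem isIn3_append (a b : String) :
    PySem.Str.isIn "3" (a ++ b) = (PySem.Str.isIn "3" a || PySem.Str.isIn "3" b) := by
  rw [Bool.eq_iff_iff]
  simp only [isIn3_eq_contains, String.toList_append, List.contains_iff_mem, List.mem_append,
    Bool.or_eq_true]

-- a fold whose step adds an accumulator-independent amount shifts
theorem foldl_shift_gen (f : Int → Int → Int) (g : Int → Int)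
    (hf : ∀ c x, f c x = c + g x) (l : List Int) (c : Int) :
    l.foldl f c = c + l.foldl f 0 := by
  induction l generalizing c with
  | nil => simp
  | cons x xs ih =>
    simp only [List.foldl_cons]
    rw [ih, ih (f 0 x), hf, hf 0 x]
    ring

-- counting fold shifts: result = accumulator + result from 0
theorem fold_if_shift (p : Int → Bool) (l : List Int) (c : Int) :
    l.foldl (fun c k => if p k then c + 1 else c) c
      = c + l.foldl (fun c k => if p k then c + 1 else c) 0 := by
  induction l generalizing c with
  | nil => simp
  | cons x xs ih =>
    simp only [List.foldl_cons]
    rw [ih, ih (if p x then 0 + 1 else 0)]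
    split <;> ring

-- the inner double loop of A for a fixed hour
def innerAB (b : Bool) (c : Int) : Int :=
  (PySem.List.pyRange 0 60 1).foldl (fun count j =>
    (PySem.List.pyRange 0 60 1).foldl (fun count k =>
      if b || PySem.Str.isIn "3" (PySem.Int.toStr j) || PySem.Str.isIn "3" (PySem.Int.toStr k)
      then count + 1 else count) count) c

theorem innerAB_shift (b : Bool) (c : Int) : innerAB b c = c + innerAB b 0 := by
  unfold innerAB
  exact foldl_shift_gen _
    (fun j => (PySem.List.pyRange 0 60 1).foldl (fun count k =>
      if b || PySem.Str.isIn "3" (PySem.Int.toStr j) || PySem.Str.isIn "3" (PySem.Int.toStr k)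
      then count + 1 else count) 0)
    (fun c j => fold_if_shift _ _ c) _ c

-- folds over the same list with pointwise-equal steps agree
theorem foldl_ext' {α : Type} (f g : Int → α → Int) (l : List α)
    (h : ∀ c x, f c x = g c x) (c : Int) : l.foldl f c = l.foldl g c := by
  induction l generalizing c with
  | nil => rfl
  | cons x xs ih => simp only [List.foldl_cons]; rw [h, ih]

-- how many of 0..59 satisfy p
def cnt60 (p : Int → Bool) : Int :=
  (PySem.List.pyRange 0 60 1).foldl (fun c k => if p k then c + 1 else c) 0

set_option maxRecDepth 100000 in
theorem cnt60_three : cnt60 (fun k => PySem.Str.isIn "3" (PySem.Int.toStr k)) = 15 := by decide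

theorem cnt60_inner (b : Bool) (j : Int) :
    cnt60 (fun k => b || PySem.Str.isIn "3" (PySem.Int.toStr j) || PySem.Str.isIn "3" (PySem.Int.toStr k))
      = if b || PySem.Str.isIn "3" (PySem.Int.toStr j) then 60 else 15 := by
  cases hbj : (b || PySem.Str.isIn "3" (PySem.Int.toStr j)) with
  | true => simp only [Bool.true_or, if_true]; decide
  | false => simp only [Bool.false_or, Bool.false_eq_true, if_false]; exact cnt60_three

theorem innerAB_eta (b : Bool) (c : Int) :
    innerAB b c = (PySem.List.pyRange 0 60 1).foldl
      (fun count j => count + (if b || PySem.Str.isIn "3" (PySem.Int.toStr j) then 60 else 15)) c := by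
  unfold innerAB
  apply foldl_ext'
  intro c' j
  rw [fold_if_shift]
  show c' + cnt60 _ = _
  rw [cnt60_inner]

set_option maxRecDepth 100000 in
theorem innerAB_true : innerAB true 0 = 3600 := by
  rw [innerAB_eta]; decide

set_option maxRecDepth 100000 in
theorem innerAB_false : innerAB false 0 = 1575 := by
  rw [innerAB_eta]; decide

theorem innerAB_val (b : Bool) (c : Int) :
    innerAB b c = c + (if b then 3600 else 1575) := by
  rw [innerAB_shift]
  cases b
  · rw [innerAB_false]; simp
  · rw [innerAB_true]; simp

-- the inner double loop of A equals B's per-hour contribution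
theorem inner_eq (i : Int) (c : Int) :
    (PySem.List.pyRange 0 60 1).foldl (fun count j =>
      (PySem.List.pyRange 0 60 1).foldl (fun count k =>
        if PySem.Str.isIn "3" (PySem.Int.toStr i ++ PySem.Int.toStr j ++ PySem.Int.toStr k)
        then count + 1 else count) count) c
      = c + (if PySem.Str.isIn "3" (PySem.Int.toStr i) then 3600 else 1575) := by
  have h : ∀ j k : Int,
      PySem.Str.isIn "3" (PySem.Int.toStr i ++ PySem.Int.toStr j ++ PySem.Int.toStr k)
        = (PySem.Str.isIn "3" (PySem.Int.toStr i) || PySem.Str.isIn "3" (PySem.Int.toStr j)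
            || PySem.Str.isIn "3" (PySem.Int.toStr k)) := by
    intro j k
    rw [isIn3_append, isIn3_append, Bool.or_assoc]
  calc (PySem.List.pyRange 0 60 1).foldl (fun count j =>
      (PySem.List.pyRange 0 60 1).foldl (fun count k =>
        if PySem.Str.isIn "3" (PySem.Int.toStr i ++ PySem.Int.toStr j ++ PySem.Int.toStr k)
        then count + 1 else count) count) c
      = innerAB (PySem.Str.isIn "3" (PySem.Int.toStr i)) c := by
        unfold innerAB
        apply foldl_ext'
        intro a x
        apply foldl_ext'
        intro a' y
        rw [h x y]
    _ = c + (if PySem.Str.isIn "3" (PySem.Int.toStr i) then 3600 else 1575) := innerAB_val _ c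

-- ===== VERDICT (by name: the statement is the Claim_ definition above) =====
theorem is_contain_sth_spec : Claim_equal_is_contain_sth := by
  intro h_ _
  unfold Spec_is_contain_sth is_contain_sth is_contain_sth_alt
  generalize PySem.List.pyRange 0 (h_ + 1) 1 = l
  induction l using List.reverseRecOn with
  | nil => rfl
  | append_singleton xs x ih =>
    simp only [List.foldl_append, List.foldl_cons, List.foldl_nil]
    rw [ih, inner_eq]
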